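-- pv_equiv track=rewrite | github.com/scyonggg/Algorithm_study | 프로그래머스/4/17685. ［3차］ 자동완성/［3차］ 자동완성.py | solution
-- ===== SOURCE A (Python) =====
-- class Node:
--     def __init__(self, word: str):
--         self.data = word
--         self.num_visited = 1  # 저장하면서 이 노드를 방문한 횟수.
--         self.children = {}  # {w: Node}
--
-- def solution(words):
--     answer = 0
--
--     root = Node('!')
--     for word in words:
--         p = root
--         for w in word:
--             if w in p.children.keys():
--                 p.children[w].num_visited += 1
--             else:
--                 p.children[w] = Node(w)
--             p = p.children[w]
--
--     for word in words:
--         p = root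
--         for w in word:
--             answer += 1
--             p = p.children[w]
--             if p.num_visited == 1:
--                 break
--
--     return answer
-- ===== SOURCE B (Python) =====
-- def lcp(a, b):
--     n = 0
--     for x, y in zip(a, b):
--         if x != y:
--             break
--         n += 1
--     return n
--
-- def solution(words):
--     total = 0
--     for i, word in enumerate(words):
--         m = 0
--         for j, other in enumerate(words):
--             if j != i:
--                 m = max(m, lcp(word, other))
--         total += min(len(word), m + 1)
--     return total
-- ===== Notes on version B (the rewrite author's own statement) =====
-- stated objective: simpler
-- what changed: Replaces the mutable trie (Node objects with visit counters and child dicts) by a direct per-word formula: each word costs min(len(word), 1 + max longest-common-prefix with any other word), computed by pairwise character comparison; no tree structure at all.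
import Mathlib
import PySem

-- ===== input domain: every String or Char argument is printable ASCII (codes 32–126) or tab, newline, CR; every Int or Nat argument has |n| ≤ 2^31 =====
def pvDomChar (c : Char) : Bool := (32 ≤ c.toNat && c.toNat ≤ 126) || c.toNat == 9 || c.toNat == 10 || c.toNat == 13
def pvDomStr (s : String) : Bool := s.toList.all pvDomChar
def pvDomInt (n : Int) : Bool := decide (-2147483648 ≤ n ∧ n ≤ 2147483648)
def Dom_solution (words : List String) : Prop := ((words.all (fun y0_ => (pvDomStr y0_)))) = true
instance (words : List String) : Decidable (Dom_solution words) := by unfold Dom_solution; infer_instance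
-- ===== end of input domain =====

-- B replaces A's mutable trie (nodes with visit counters) by a direct per-word formula
-- min(len(word), 1 + max LCP with any other word); objective: simpler, no speed claim.

-- ===== PORT A =====
-- Lean forbids the nested inductive a child-dict trie needs (children : Dict Char Node), so the
-- trie is encoded by its observable state: a dict mapping each node's path (the prefix leading to
-- it) to its num_visited; every Python step (child-membership test, counter increment, node
-- creation, child lookup) maps one-to-one onto a step on that dict.
def trieStep (d : PySem.Dict (List Char) Int) (q : List Char) : PySem.Dict (List Char) Int :=
  if d.contains q then d.modify q 0 (· + 1) else d.insert q 1

def trieInsert (d : PySem.Dict (List Char) Int) (p : List Char) : List Char → PySem.Dict (List Char) Int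
  | [] => d
  | c :: rest => trieInsert (trieStep d (p ++ [c])) (p ++ [c]) rest

def trieWalk (d : PySem.Dict (List Char) Int) (p : List Char) : List Char → Int
  | [] => 0
  | c :: rest => 1 + (if d.getD (p ++ [c]) 0 = 1 then 0 else trieWalk d (p ++ [c]) rest)

def solution (words : List String) : Int :=
  let root := words.foldl (fun d word => trieInsert d [] word.toList) PySem.Dict.empty
  words.foldl (fun answer word => answer + trieWalk root [] word.toList) 0

-- ===== PORT B =====
def lcpChars : List Char → List Char → Nat
  | x :: xs, y :: ys => if x = y then lcpChars xs ys + 1 else 0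
  | _, _ => 0

def solution_alt (words : List String) : Int :=
  (PySem.List.enumerate words).foldl (fun total wi =>
    let m := (PySem.List.enumerate words).foldl
      (fun m oj => if oj.1 ≠ wi.1 then max m (lcpChars wi.2.toList oj.2.toList) else m) 0
    total + ((min wi.2.toList.length (m + 1) : Nat) : Int)) 0

-- ===== PRECONDITION & SPEC =====
def Spec_solution (words : List String) (out : Int) : Prop := out = solution_alt words
instance (words : List String) (out : Int) : Decidable (Spec_solution words out) := by unfold Spec_solution; infer_instance

-- ===== CLAIM (what is proved, stated in full; the proofs are below) =====
def Claim_equal_solution : Prop := ∀ (words : List String), Dom_solution words → Spec_solution words (solution words)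

-- ===== LEMMAS AND PROOFS =====

def nePrefixes (p : List Char) : List Char → List (List Char)
  | [] => []
  | c :: rest => (p ++ [c]) :: nePrefixes (p ++ [c]) rest

lemma trieStep_getD (d : PySem.Dict (List Char) Int) (q r : List Char) :
    (trieStep d q).getD r 0 = d.getD r 0 + (if r = q then 1 else 0) := by
  unfold trieStep
  by_cases h : d.contains q
  · rw [if_pos h, PySem.Dict.getD_modify]
    split_ifs with hr <;> simp [hr]
  · rw [if_neg h, PySem.Dict.getD_insert]
    split_ifs with hr
    · subst hr
      rw [PySem.Dict.getD, (PySem.Dict.get?_eq_none_iff_contains _ _).mpr (by simpa using h)]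
      rfl
    · ring

lemma trieInsert_getD : ∀ (cs p : List Char) (d : PySem.Dict (List Char) Int) (r : List Char),
    (trieInsert d p cs).getD r 0 = d.getD r 0 + ((nePrefixes p cs).count r : Int)
  | [], p, d, r => by simp [trieInsert, nePrefixes]
  | c :: rest, p, d, r => by
    rw [trieInsert, trieInsert_getD rest, trieStep_getD, nePrefixes, List.count_cons]
    push_cast
    split_ifs with h1 h2 h2 <;> simp_all <;> ring

lemma mem_nePrefixes : ∀ (cs p r : List Char),
    r ∈ nePrefixes p cs ↔ ∃ s, s ≠ [] ∧ s <+: cs ∧ r = p ++ s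
  | [], p, r => by simp [nePrefixes]
  | c :: rest, p, r => by
    rw [nePrefixes, List.mem_cons, mem_nePrefixes rest]
    constructor
    · rintro (h | ⟨s, hs, hpre, rfl⟩)
      · exact ⟨[c], by simp, ⟨rest, rfl⟩, h⟩
      · exact ⟨c :: s, by simp, by simpa [List.cons_prefix_cons] using hpre, by simp⟩
    · rintro ⟨s, hs, hpre, rfl⟩
      match s, hs with
      | x :: s', _ =>
        rw [List.cons_prefix_cons] at hpre
        obtain ⟨rfl, hpre⟩ := hpre
        rcases s' with _ | ⟨y, s''⟩
        · exact Or.inl rfl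
        · exact Or.inr ⟨y :: s'', by simp, hpre, by simp⟩

lemma length_lt_of_mem_nePrefixes {cs p r : List Char} (h : r ∈ nePrefixes p cs) :
    p.length < r.length := by
  obtain ⟨s, hs, -, rfl⟩ := (mem_nePrefixes cs p r).mp h
  have := List.length_pos_iff.mpr hs
  simp; omega

lemma nodup_nePrefixes : ∀ (cs p : List Char), (nePrefixes p cs).Nodup
  | [], p => by simp [nePrefixes]
  | c :: rest, p => by
    rw [nePrefixes]
    refine List.nodup_cons.mpr ⟨fun hmem => ?_, nodup_nePrefixes rest _⟩
    have := length_lt_of_mem_nePrefixes hmem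
    simp at this

lemma count_nePrefixes_nil (cs r : List Char) :
    (nePrefixes [] cs).count r = if r ≠ [] ∧ r <+: cs then 1 else 0 := by
  split_ifs with h
  · exact List.count_eq_one_of_mem (nodup_nePrefixes cs [])
      ((mem_nePrefixes cs [] r).mpr ⟨r, h.1, h.2, by simp⟩)
  · refine List.count_eq_zero.mpr (fun hmem => ?_)
    obtain ⟨s, hs, hpre, rfl⟩ := (mem_nePrefixes cs [] _).mp hmem
    simp at hs hpre ⊢
    exact h ⟨by simpa using hs, by simpa using hpre⟩

lemma build_getD : ∀ (ws : List String) (d : PySem.Dict (List Char) Int) (r : List Char),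
    (ws.foldl (fun d w => trieInsert d [] w.toList) d).getD r 0
      = d.getD r 0 + (ws.countP (fun w => decide (r ≠ [] ∧ r <+: w.toList)) : Int)
  | [], d, r => by simp
  | w :: ws, d, r => by
    rw [List.foldl_cons, build_getD ws, trieInsert_getD, count_nePrefixes_nil, List.countP_cons]
    push_cast
    split_ifs with h1 h2 h2 <;> simp_all <;> ring

lemma take_prefix_iff_lcp : ∀ (k : Nat) (a b : List Char), k ≤ a.length →
    (a.take k <+: b ↔ k ≤ lcpChars a b)
  | 0, a, b, _ => by simp
  | k + 1, [], b, h => by simp at h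
  | k + 1, x :: xs, [], h => by
    simp [lcpChars, List.take_succ_cons]
  | k + 1, x :: xs, y :: ys, h => by
    rw [List.take_succ_cons, List.cons_prefix_cons, lcpChars]
    split_ifs with hxy
    · subst hxy
      rw [take_prefix_iff_lcp k xs ys (by simpa using h)]
      simp
    · simp [hxy]

lemma foldl_max_lt_iff (f : Int × String → Nat) (i : Int) :
    ∀ (l : List (Int × String)) (a k : Nat),
    (l.foldl (fun m x => if x.1 ≠ i then max m (f x) else m) a < k) ↔
      (a < k ∧ ∀ x ∈ l, x.1 ≠ i → f x < k)
  | [], a, k => by simp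
  | x :: l, a, k => by
    rw [List.foldl_cons, foldl_max_lt_iff f i l]
    by_cases hx : x.1 = i
    · simp [hx]
    · simp [hx]
      aesop

lemma enumerate_cons (a : String) (l : List String) (n : Int) :
    PySem.List.enumerate (a :: l) n = (n, a) :: PySem.List.enumerate l (n+1) := rfl

lemma le_fst_of_mem_enumerate {l : List String} {x : Int × String} {n : Int}
    (h : x ∈ PySem.List.enumerate l n) : n ≤ x.1 := by
  rw [PySem.List.mem_enumerate_iff] at h
  obtain ⟨k, hk, rfl⟩ := h
  simp

lemma countP_enumerate_snd (Q : String → Bool) : ∀ (l : List String) (n : Int),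
    (PySem.List.enumerate l n).countP (fun x => Q x.2) = l.countP Q
  | [], n => by simp [PySem.List.enumerate]
  | w :: l, n => by
    rw [enumerate_cons, List.countP_cons, List.countP_cons, countP_enumerate_snd Q l]

lemma countP_enumerate_split (Q : String → Bool) : ∀ (l : List String) (n : Int) (w : String) (i : Int),
    (i, w) ∈ PySem.List.enumerate l n → Q w = true →
    (PySem.List.enumerate l n).countP (fun x => Q x.2)
      = 1 + (PySem.List.enumerate l n).countP (fun x => decide (x.1 ≠ i) && Q x.2)
  | [], n, w, i, hmem, _ => by simp [PySem.List.enumerate] at hmem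
  | a :: l, n, w, i, hmem, hQ => by
    rw [enumerate_cons, List.mem_cons] at hmem
    rw [enumerate_cons, List.countP_cons, List.countP_cons]
    rcases hmem with heq | hmem
    · simp only [Prod.mk.injEq] at heq
      obtain ⟨rfl, rfl⟩ := heq
      have htail : (PySem.List.enumerate l (i+1)).countP (fun x => decide (x.1 ≠ i) && Q x.2)
          = (PySem.List.enumerate l (i+1)).countP (fun x => Q x.2) := by
        refine List.countP_congr (fun x hx => ?_)
        have := le_fst_of_mem_enumerate hx
        simp [show x.1 ≠ i by omega]
      rw [htail]
      simp [hQ]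
      omega
    · have hin : i ≠ n := by
        have := le_fst_of_mem_enumerate hmem
        simp at this; omega
      rw [countP_enumerate_split Q l (n+1) w i hmem hQ]
      simp [show n ≠ i from fun h => hin h.symm]
      omega

lemma walk_eq : ∀ (rest p : List Char) (m : Nat) (d : PySem.Dict (List Char) Int),
    p.length ≤ m →
    (∀ k, 1 ≤ k → k ≤ rest.length → (d.getD (p ++ rest.take k) 0 = 1 ↔ m < p.length + k)) →
    trieWalk d p rest = ((min rest.length (m + 1 - p.length) : Nat) : Int)
  | [], p, m, d, _, _ => by simp [trieWalk]
  | c :: rest, p, m, d, hpm, hyp => by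
    rw [trieWalk]
    have h1 := hyp 1 (by omega) (by simp)
    simp only [List.take_succ_cons, List.take_zero] at h1
    by_cases hm : m = p.length
    · rw [if_pos (h1.mpr (by omega))]
      have : min (c :: rest).length (m + 1 - p.length) = 1 := by
        simp; omega
      rw [this]; ring
    · rw [if_neg (fun hone => by have := h1.mp hone; omega)]
      rw [walk_eq rest (p ++ [c]) m d (by simp; omega) (fun k hk1 hk2 => by
        have := hyp (k + 1) (by omega) (by simp; omega)
        simpa [List.take_succ_cons, List.append_assoc, Nat.add_assoc, Nat.add_comm 1 k] using this)]
      simp only [List.length_append, List.length_cons, List.length_nil]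
      omega

lemma foldl_enumerate_snd (g : Int → String → Int) : ∀ (l : List String) (n : Int) (init : Int),
    (PySem.List.enumerate l n).foldl (fun acc x => g acc x.2) init = l.foldl g init
  | [], n, init => by simp [PySem.List.enumerate]
  | w :: l, n, init => by
    rw [enumerate_cons, List.foldl_cons, List.foldl_cons, foldl_enumerate_snd g l]

theorem solution_eq (words : List String) : solution words = solution_alt words := by
  simp only [solution, solution_alt]
  set root := words.foldl (fun d word => trieInsert d [] word.toList) PySem.Dict.empty with hroot
  rw [← foldl_enumerate_snd (fun acc w => acc + trieWalk root [] w.toList) words 0 0]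
  refine PySem.List.foldl_congr_mem' _ _ _ _ (fun x hx acc => ?_)
  obtain ⟨i, w⟩ := x
  congr 1
  have hcnt : ∀ k, 1 ≤ k → k ≤ w.toList.length →
      (root.getD (w.toList.take k) 0 = 1 ↔
        (PySem.List.enumerate words).foldl
          (fun m oj => if oj.1 ≠ i then max m (lcpChars w.toList oj.2.toList) else m) 0 < k) := by
    intro k hk1 hk2
    have hne : w.toList.take k ≠ [] := by
      have hlen : (w.toList.take k).length = k := by
        rw [List.length_take]; omega
      intro h
      rw [h] at hlen
      simp at hlen
      omega
    rw [hroot, build_getD]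
    have hemp : (PySem.Dict.empty : PySem.Dict (List Char) Int).getD (w.toList.take k) 0 = 0 := by
      rfl
    rw [hemp, zero_add]
    have hcong : words.countP (fun w' => decide (w.toList.take k ≠ [] ∧ w.toList.take k <+: w'.toList))
        = words.countP (fun w' => decide (w.toList.take k <+: w'.toList)) := by
      refine List.countP_congr (fun a _ => ?_)
      simp [hne]
    rw [hcong, ← countP_enumerate_snd _ words 0,
      countP_enumerate_split (fun s => decide (List.take k w.toList <+: s.toList)) words 0 w i hx
        (by simp [List.take_prefix]),
      foldl_max_lt_iff]
    constructor
    · intro h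
      refine ⟨by omega, fun y hy hyi => ?_⟩
      have hzero : ((PySem.List.enumerate words).countP (fun x => decide (x.1 ≠ i) && decide (w.toList.take k <+: x.2.toList))) = 0 := by
        omega
      rw [List.countP_eq_zero] at hzero
      have := hzero y hy
      simp [hyi] at this
      by_contra hlt
      exact this ((take_prefix_iff_lcp k w.toList y.2.toList hk2).mpr (by omega))
    · rintro ⟨-, h⟩
      have hzero : ((PySem.List.enumerate words).countP (fun x => decide (x.1 ≠ i) && decide (w.toList.take k <+: x.2.toList))) = 0 := by
        rw [List.countP_eq_zero]
        intro y hy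
        simp only [Bool.and_eq_true, decide_eq_true_eq]
        rintro ⟨hyi, hpre⟩
        have := h y hy hyi
        have := (take_prefix_iff_lcp k w.toList y.2.toList hk2).mp hpre
        omega
      omega
  rw [walk_eq w.toList [] _ root (Nat.zero_le _) (fun k hk1 hk2 => by
    simpa using hcnt k hk1 hk2)]
  simp

-- ===== VERDICT (by name: the statement is the Claim_ definition above) =====
theorem solution_spec : Claim_equal_solution := by
  intro words _
  unfold Spec_solution
  exact solution_eq words
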